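-- pv_equiv track=rewrite | github.com/jliu2006/usaco | train.usaco.org/Chapter_1/S1.3_Complete_Search/1_Milking_Cows.py | getLongestRun
-- ===== SOURCE A (Python) =====
-- def getLongestRun(arr):
--     length = 0
--     pause = 0
--     run_start = arr[0][0]
--     run_end = arr[0][1]
--     idx = 0
--     while idx < len(arr):
--         row = arr[idx]
--         hold_start = row[0]
--         hold_end = row[1]
--         if hold_start <= run_end:
--             if hold_end > run_end:
--                 run_end = hold_end
--         else:
--             length = max(length, run_end - run_start)
--             pause = max(pause, hold_start - run_end)
--             run_start = hold_start
--             run_end = hold_end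
--         idx += 1
--     length = max(length, run_end - run_start)
--     return length, pause
-- ===== SOURCE B (Python) =====
-- def getLongestRun(arr):
--     # Two-phase decomposition: first merge the intervals into disjoint segments
--     # (same break condition as the original), then take maxima over the segment
--     # lengths and the gaps between consecutive segments.
--     cur_s, cur_e = arr[0][0], arr[0][1]
--     segs = []
--     for row in arr:
--         s, e = row[0], row[1]
--         if s <= cur_e:
--             if e > cur_e:
--                 cur_e = e
--         else:
--             segs.append((cur_s, cur_e))
--             cur_s, cur_e = s, e
--     segs.append((cur_s, cur_e))
--     length = max([e - s for (s, e) in segs] + [0])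
--     pause = max([b[0] - a[1] for a, b in zip(segs, segs[1:])] + [0])
--     return length, pause
-- ===== Notes on version B (the rewrite author's own statement) =====
-- stated objective: alternative
-- what changed: Instead of maintaining running length/pause maxima inside the scan, B first materializes the list of merged disjoint segments and then computes the maximal segment length and the maximal gap between consecutive segments in two separate max passes.
import Mathlib
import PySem

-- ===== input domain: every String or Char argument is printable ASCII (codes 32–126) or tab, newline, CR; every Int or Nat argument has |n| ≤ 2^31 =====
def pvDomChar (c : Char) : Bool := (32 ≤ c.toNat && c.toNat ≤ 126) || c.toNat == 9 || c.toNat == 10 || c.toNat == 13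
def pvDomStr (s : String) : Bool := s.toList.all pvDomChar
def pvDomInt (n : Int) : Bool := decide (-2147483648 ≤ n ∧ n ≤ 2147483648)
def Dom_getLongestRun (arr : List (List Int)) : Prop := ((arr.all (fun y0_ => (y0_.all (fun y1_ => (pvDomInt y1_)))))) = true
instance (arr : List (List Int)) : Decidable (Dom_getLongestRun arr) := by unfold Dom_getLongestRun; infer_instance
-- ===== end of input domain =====

-- B changes the decomposition: it first materializes the merged disjoint segments, then takes
-- maxima over segment lengths and over gaps between consecutive segments (objective: alternative).


-- ===== PORT A =====
-- loop body of A's while loop (state: length, pause, run_start, run_end)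
def stepA (st : Int × Int × Int × Int) (row : List Int) : Int × Int × Int × Int :=
  let hold_start := PySem.List.pyGetD row 0 0   -- row[0]; in range under Pre_
  let hold_end := PySem.List.pyGetD row 1 0     -- row[1]; in range under Pre_
  if hold_start ≤ st.2.2.2 then
    if hold_end > st.2.2.2 then (st.1, st.2.1, st.2.2.1, hold_end) else st
  else
    (max st.1 (st.2.2.2 - st.2.2.1), max st.2.1 (hold_start - st.2.2.2), hold_start, hold_end)

def getLongestRun (arr : List (List Int)) : Int × Int :=
  let run_start := PySem.List.pyGetD (PySem.List.pyGetD arr 0 []) 0 0  -- arr[0][0]; in range under Pre_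
  let run_end := PySem.List.pyGetD (PySem.List.pyGetD arr 0 []) 1 0   -- arr[0][1]
  let st := arr.foldl stepA (0, 0, run_start, run_end)
  (max st.1 (st.2.2.2 - st.2.2.1), st.2.1)

-- ===== PORT B =====
-- loop body of B's merging loop (state: segs, cur_s, cur_e)
def stepB (st : List (Int × Int) × Int × Int) (row : List Int) : List (Int × Int) × Int × Int :=
  let s := PySem.List.pyGetD row 0 0
  let e := PySem.List.pyGetD row 1 0
  if s ≤ st.2.2 then
    if e > st.2.2 then (st.1, st.2.1, e) else st
  else
    (st.1 ++ [(st.2.1, st.2.2)], s, e)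

def getLongestRun_alt (arr : List (List Int)) : Int × Int :=
  let cs := PySem.List.pyGetD (PySem.List.pyGetD arr 0 []) 0 0  -- arr[0][0]; in range under Pre_
  let ce := PySem.List.pyGetD (PySem.List.pyGetD arr 0 []) 1 0  -- arr[0][1]
  let st := arr.foldl stepB ([], cs, ce)
  let segs := st.1 ++ [(st.2.1, st.2.2)]
  -- max(lst + [0]): the argument list is nonempty, so max? is some
  let length := (PySem.List.max? ((segs.map (fun p => p.2 - p.1)) ++ [0]) (fun y => y)).getD 0
  let pause := (PySem.List.max? (((segs.zip (segs.drop 1)).map (fun ab => ab.2.1 - ab.1.2)) ++ [0]) (fun y => y)).getD 0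
  (length, pause)

-- ===== PRECONDITION & SPEC =====
-- Pre_ excludes exactly the inputs where the Python raises IndexError: empty arr (arr[0]) and rows
-- with fewer than two entries (row[0]/row[1]).
def Pre_getLongestRun (arr : List (List Int)) : Prop :=
  arr ≠ [] ∧ ∀ row ∈ arr, 2 ≤ row.length
instance (arr : List (List Int)) : Decidable (Pre_getLongestRun arr) := by
  unfold Pre_getLongestRun; infer_instance

def pvWitness_getLongestRun : List (List Int) := [[1, 5], [3, 7], [10, 12]]

def Spec_getLongestRun (arr : List (List Int)) (out : Int × Int) : Prop := out = getLongestRun_alt arr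
instance (arr : List (List Int)) (out : Int × Int) : Decidable (Spec_getLongestRun arr out) := by unfold Spec_getLongestRun; infer_instance

-- ===== CLAIM (what is proved, stated in full; the proofs are below) =====
def Claim_equal_getLongestRun : Prop := ∀ (arr : List (List Int)), Dom_getLongestRun arr → Pre_getLongestRun arr → Spec_getLongestRun arr (getLongestRun arr)

-- ===== LEMMAS AND PROOFS =====

-- segment length and the gap list of a segment list
def segLen (p : Int × Int) : Int := p.2 - p.1
def gapsP (m : List (Int × Int)) : List Int := (m.zip (m.drop 1)).map (fun ab => ab.2.1 - ab.1.2)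

lemma foldl_max_max (t : List Int) : ∀ a b : Int, max (t.foldl max a) b = t.foldl max (max a b) := by
  induction t with
  | nil => intro a b; rfl
  | cons x t ih =>
    intro a b
    simp only [List.foldl_cons, ih]
    rw [max_right_comm]

-- max(lst + [0]) equals the running max from 0
lemma maxD0_eq_foldl (m : List Int) :
    (PySem.List.max? (m ++ [0]) (fun y => y)).getD 0 = m.foldl max 0 := by
  cases m with
  | nil => rfl
  | cons a t =>
    rw [List.cons_append, PySem.List.max?_id_cons]
    simp only [Option.getD_some, List.foldl_append, List.foldl_cons, List.foldl_nil]
    rw [foldl_max_max]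
    rw [max_comm a 0]

-- the gap list ignores the end of the last segment
lemma gapsP_last_end : ∀ (l : List (Int × Int)) (a e1 e2 : Int),
    gapsP (l ++ [(a, e1)]) = gapsP (l ++ [(a, e2)]) := by
  intro l
  induction l with
  | nil => intro a e1 e2; rfl
  | cons p t ih =>
    intro a e1 e2
    cases t with
    | nil => rfl
    | cons q t' =>
      simp only [gapsP, List.cons_append, List.drop_succ_cons, List.drop_zero,
        List.zip_cons_cons, List.map_cons] at *
      exact congrArg _ (ih a e1 e2)

-- appending one more segment appends one gap
lemma gapsP_snoc2 : ∀ (l : List (Int × Int)) (c y : Int × Int),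
    gapsP (l ++ [c, y]) = gapsP (l ++ [c]) ++ [y.1 - c.2] := by
  intro l
  induction l with
  | nil => intro c y; rfl
  | cons p t ih =>
    intro c y
    cases t with
    | nil => rfl
    | cons q t' =>
      simp only [gapsP, List.cons_append, List.drop_succ_cons, List.drop_zero,
        List.zip_cons_cons, List.map_cons] at *
      rw [ih c y]

-- loop invariant: A's running (length, pause) are the segment-length max and gap max of B's state
lemma loop_inv (rest : List (List Int)) : ∀ (segs : List (Int × Int)) (cs ce : Int),
    rest.foldl stepA ((segs.map segLen).foldl max 0, (gapsP (segs ++ [(cs, ce)])).foldl max 0, cs, ce)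
    = (((rest.foldl stepB (segs, cs, ce)).1.map segLen).foldl max 0,
       (gapsP ((rest.foldl stepB (segs, cs, ce)).1
           ++ [((rest.foldl stepB (segs, cs, ce)).2.1, (rest.foldl stepB (segs, cs, ce)).2.2)])).foldl max 0,
       (rest.foldl stepB (segs, cs, ce)).2.1, (rest.foldl stepB (segs, cs, ce)).2.2) := by
  induction rest with
  | nil => intro segs cs ce; rfl
  | cons row t ih =>
    intro segs cs ce
    simp only [List.foldl_cons]
    by_cases h1 : PySem.List.pyGetD row 0 0 ≤ ce
    · by_cases h2 : PySem.List.pyGetD row 1 0 > ce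
      · have hA : stepA ((segs.map segLen).foldl max 0, (gapsP (segs ++ [(cs, ce)])).foldl max 0, cs, ce) row
            = ((segs.map segLen).foldl max 0, (gapsP (segs ++ [(cs, PySem.List.pyGetD row 1 0)])).foldl max 0,
               cs, PySem.List.pyGetD row 1 0) := by
          simp [stepA, h1, h2, gapsP_last_end segs cs ce (PySem.List.pyGetD row 1 0)]
        have hB : stepB (segs, cs, ce) row = (segs, cs, PySem.List.pyGetD row 1 0) := by
          simp [stepB, h1, h2]
        rw [hA, hB, ih]
      · have hA : stepA ((segs.map segLen).foldl max 0, (gapsP (segs ++ [(cs, ce)])).foldl max 0, cs, ce) row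
            = ((segs.map segLen).foldl max 0, (gapsP (segs ++ [(cs, ce)])).foldl max 0, cs, ce) := by
          simp [stepA, h1, h2]
        have hB : stepB (segs, cs, ce) row = (segs, cs, ce) := by
          simp [stepB, h1, h2]
        rw [hA, hB, ih]
    · have hA : stepA ((segs.map segLen).foldl max 0, (gapsP (segs ++ [(cs, ce)])).foldl max 0, cs, ce) row
          = (((segs ++ [(cs, ce)]).map segLen).foldl max 0,
             (gapsP ((segs ++ [(cs, ce)]) ++ [(PySem.List.pyGetD row 0 0, PySem.List.pyGetD row 1 0)])).foldl max 0,
             PySem.List.pyGetD row 0 0, PySem.List.pyGetD row 1 0) := by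
        simp only [stepA, if_neg h1]
        have hlen : max ((segs.map segLen).foldl max 0) (ce - cs)
            = ((segs ++ [(cs, ce)]).map segLen).foldl max 0 := by
          simp [List.foldl_append, segLen]
        have hgap : max ((gapsP (segs ++ [(cs, ce)])).foldl max 0) (PySem.List.pyGetD row 0 0 - ce)
            = (gapsP ((segs ++ [(cs, ce)]) ++ [(PySem.List.pyGetD row 0 0, PySem.List.pyGetD row 1 0)])).foldl max 0 := by
          rw [List.append_assoc]
          simp only [List.cons_append, List.nil_append]
          rw [gapsP_snoc2 segs (cs, ce) (PySem.List.pyGetD row 0 0, PySem.List.pyGetD row 1 0)]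
          simp [List.foldl_append]
        rw [← hlen, ← hgap]
      have hB : stepB (segs, cs, ce) row
          = (segs ++ [(cs, ce)], PySem.List.pyGetD row 0 0, PySem.List.pyGetD row 1 0) := by
        simp only [stepB, if_neg h1]
      rw [hA, hB, ih]

-- ===== VERDICT (by name: the statement is the Claim_ definition above) =====
theorem getLongestRun_spec : Claim_equal_getLongestRun := by
  intro arr _ _
  unfold Spec_getLongestRun getLongestRun getLongestRun_alt
  simp only []
  rw [show ((0 : Int), (0 : Int), PySem.List.pyGetD (PySem.List.pyGetD arr 0 []) 0 0,
        PySem.List.pyGetD (PySem.List.pyGetD arr 0 []) 1 0)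
      = ((([] : List (Int × Int)).map segLen).foldl max 0,
         (gapsP ([] ++ [(PySem.List.pyGetD (PySem.List.pyGetD arr 0 []) 0 0,
            PySem.List.pyGetD (PySem.List.pyGetD arr 0 []) 1 0)])).foldl max 0,
         PySem.List.pyGetD (PySem.List.pyGetD arr 0 []) 0 0,
         PySem.List.pyGetD (PySem.List.pyGetD arr 0 []) 1 0) from rfl]
  rw [loop_inv]
  rw [maxD0_eq_foldl, maxD0_eq_foldl]
  simp only [List.map_append, List.foldl_append, List.map_cons, List.map_nil,
    List.foldl_cons, List.foldl_nil]
  rfl
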